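-- pv_equiv track=rewrite | github.com/hqiu-nju/scepter | scepter/earthgrid.py | _build_reuse_second_ring_neighbors
-- ===== SOURCE A (Python) =====
-- def _build_reuse_second_ring_neighbors(
--     neighbors: list[list[int]],
-- ) -> list[list[int]]:
--     second_ring_neighbors: list[list[int]] = [[] for _ in range(len(neighbors))]
--     for index, neighbor_ids in enumerate(neighbors):
--         ring_ids: set[int] = set()
--         direct_neighbor_ids = set(int(value) for value in neighbor_ids)
--         for neighbor in neighbor_ids:
--             ring_ids.update(int(value) for value in neighbors[int(neighbor)])
--         ring_ids.discard(int(index))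
--         ring_ids.difference_update(direct_neighbor_ids)
--         second_ring_neighbors[int(index)] = sorted(ring_ids)
--     return second_ring_neighbors
-- ===== SOURCE B (Python) =====
-- def _build_reuse_second_ring_neighbors(
--     neighbors: list[list[int]],
-- ) -> list[list[int]]:
--     n = len(neighbors)
--     # transpose: preds[m] = all nodes u that have m among their neighbors
--     preds: list[list[int]] = [[] for _ in range(n)]
--     for u, nbrs in enumerate(neighbors):
--         for v in nbrs:
--             preds[int(v)].append(u)
--     # scatter: each middle node m sends its value-set once to every predecessor
--     ring: list[set[int]] = [set() for _ in range(n)]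
--     for m in range(n):
--         s = {int(w) for w in neighbors[m]}
--         for u in preds[m]:
--             ring[u].update(s)
--     out: list[list[int]] = []
--     for u, nbrs in enumerate(neighbors):
--         r = ring[u]
--         r.discard(int(u))
--         r.difference_update(int(v) for v in nbrs)
--         out.append(sorted(r))
--     return out
-- ===== Notes on version B (the rewrite author's own statement) =====
-- stated objective: alternative
-- what changed: B pivots on the middle node: it first builds a predecessor (transpose) index, then scatters each middle node's value-set once to all its predecessors, instead of gathering neighbors-of-neighbors separately per node.
import Mathlib
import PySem

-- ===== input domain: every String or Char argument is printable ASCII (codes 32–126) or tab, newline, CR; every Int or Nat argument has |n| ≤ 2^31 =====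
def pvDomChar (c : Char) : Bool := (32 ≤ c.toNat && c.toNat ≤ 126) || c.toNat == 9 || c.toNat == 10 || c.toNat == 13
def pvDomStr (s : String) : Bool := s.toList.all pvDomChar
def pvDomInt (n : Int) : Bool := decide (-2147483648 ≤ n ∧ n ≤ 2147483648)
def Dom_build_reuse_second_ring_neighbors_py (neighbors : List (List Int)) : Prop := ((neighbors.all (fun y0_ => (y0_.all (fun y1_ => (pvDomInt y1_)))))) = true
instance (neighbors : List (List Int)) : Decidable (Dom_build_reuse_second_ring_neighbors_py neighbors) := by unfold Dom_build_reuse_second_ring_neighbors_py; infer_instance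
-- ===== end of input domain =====

-- B builds a predecessor (transpose) index and scatters each middle node's value-set to its
-- predecessors, instead of gathering neighbors-of-neighbors per node; objective: alternative.

-- ===== PORT A =====
def build_reuse_second_ring_neighbors_py (neighbors : List (List Int)) : List (List Int) :=
  let second := List.replicate neighbors.length ([] : List Int)
  (PySem.List.enumerate neighbors 0).foldl (fun second p =>
    let direct : PySem.Set Int := PySem.Set.ofList p.2
    let ring : PySem.Set Int := p.2.foldl
      (fun r v => PySem.Set.update r (PySem.List.pyGetD neighbors v []))
      PySem.Set.empty
    let ring := PySem.Set.discard ring p.1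
    let ring := PySem.Set.diff ring direct
    PySem.List.pySetD second p.1 (PySem.List.sorted ring (fun x => x) false)) second

-- ===== PORT B =====
def build_reuse_second_ring_neighbors_py_alt (neighbors : List (List Int)) : List (List Int) :=
  let n := neighbors.length
  let preds0 := List.replicate n ([] : List Int)
  let preds := (PySem.List.enumerate neighbors 0).foldl (fun preds p =>
    p.2.foldl (fun preds v =>
      PySem.List.pySetD preds v (PySem.List.pyGetD preds v [] ++ [p.1])) preds) preds0
  let ring0 := List.replicate n (PySem.Set.empty : PySem.Set Int)
  let ring := (PySem.List.pyRange 0 (n : Int) 1).foldl (fun ring m =>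
    let s := PySem.Set.ofList (PySem.List.pyGetD neighbors m [])
    (PySem.List.pyGetD preds m []).foldl (fun ring u =>
      PySem.List.pySetD ring u (PySem.Set.update (PySem.List.pyGetD ring u []) s)) ring) ring0
  (PySem.List.enumerate neighbors 0).foldl (fun out p =>
    let r := PySem.List.pyGetD ring p.1 []
    let r := PySem.Set.discard r p.1
    let r := PySem.Set.diff r (PySem.Set.ofList p.2)
    out ++ [PySem.List.sorted r (fun x => x) false]) []

-- ===== PRECONDITION & SPEC =====
-- Pre_: every stored id must be a valid (possibly negative) Python index into `neighbors`;
-- otherwise A raises IndexError at `neighbors[int(neighbor)]`.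
def Pre_build_reuse_second_ring_neighbors_py (neighbors : List (List Int)) : Prop :=
  ∀ row ∈ neighbors, ∀ v ∈ row, PySem.Raise.InRange neighbors.length v
instance (neighbors : List (List Int)) : Decidable (Pre_build_reuse_second_ring_neighbors_py neighbors) := by unfold Pre_build_reuse_second_ring_neighbors_py; infer_instance
def pvWitness_build_reuse_second_ring_neighbors_py : List (List Int) := [[1, -1], [0, 2], [1]]

def Spec_build_reuse_second_ring_neighbors_py (neighbors : List (List Int)) (out : List (List Int)) : Prop := out = build_reuse_second_ring_neighbors_py_alt neighbors
instance (neighbors : List (List Int)) (out : List (List Int)) : Decidable (Spec_build_reuse_second_ring_neighbors_py neighbors out) := by unfold Spec_build_reuse_second_ring_neighbors_py; infer_instance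

-- ===== CLAIM (what is proved, stated in full; the proofs are below) =====
def Claim_equal_build_reuse_second_ring_neighbors_py : Prop := ∀ (neighbors : List (List Int)), Dom_build_reuse_second_ring_neighbors_py neighbors → Pre_build_reuse_second_ring_neighbors_py neighbors → Spec_build_reuse_second_ring_neighbors_py neighbors (build_reuse_second_ring_neighbors_py neighbors)

-- ===== LEMMAS AND PROOFS =====

def pvWrap (n : Nat) (v : Int) : Nat := (if v < 0 then v + n else v).toNat

theorem pvWrap_lt {n : Nat} {v : Int} (h : PySem.Raise.InRange n v) : pvWrap n v < n := by
  obtain ⟨h1, h2⟩ := h; unfold pvWrap; split <;> omega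

theorem pyIdx_wrap {n : Nat} {v : Int} (h : PySem.Raise.InRange n v) :
    PySem.List.pyIdx? n v = some (pvWrap n v) := by
  obtain ⟨h1, h2⟩ := h
  simp only [PySem.List.pyIdx?, pvWrap]
  split_ifs <;> first | (exfalso; omega) | (simp; try omega)

theorem pyGetD_wrap {α : Type} {xs : List α} {v : Int} {d : α}
    (h : PySem.Raise.InRange xs.length v) :
    PySem.List.pyGetD xs v d = xs.getD (pvWrap xs.length v) d := by
  simp [PySem.List.pyGetD, PySem.List.pyGet?, pyIdx_wrap h, List.getD_eq_getElem?_getD]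

theorem pySetD_wrap {α : Type} {xs : List α} {v : Int} {y : α}
    (h : PySem.Raise.InRange xs.length v) :
    PySem.List.pySetD xs v y = xs.set (pvWrap xs.length v) y := by
  simp [PySem.List.pySetD, PySem.List.pySet?, pyIdx_wrap h]

-- membership of a union-fold of sets
theorem foldl_update_mem {α : Type} [BEq α] [LawfulBEq α] (f : Int → List α) (w : α) :
    ∀ (l : List Int) (r0 : PySem.Set α),
      (w ∈ l.foldl (fun r v => PySem.Set.update r (f v)) r0 ↔ w ∈ r0 ∨ ∃ v ∈ l, w ∈ f v) := by
  intro l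
  induction l with
  | nil => simp
  | cons v l ih =>
    intro r0
    simp only [List.foldl_cons, ih, PySem.Set.mem_update, List.mem_cons]
    constructor
    · rintro ((h | h) | ⟨x, hx, hw⟩)
      · exact Or.inl h
      · exact Or.inr ⟨v, Or.inl rfl, h⟩
      · exact Or.inr ⟨x, Or.inr hx, hw⟩
    · rintro (h | ⟨x, (rfl | hx), hw⟩)
      · exact Or.inl (Or.inl h)
      · exact Or.inl (Or.inr hw)
      · exact Or.inr ⟨x, hx, hw⟩

theorem foldl_update_nodup {α : Type} [BEq α] [LawfulBEq α] (f : Int → List α) :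
    ∀ (l : List Int) (r0 : PySem.Set α), r0.Nodup →
      (l.foldl (fun r v => PySem.Set.update r (f v)) r0).Nodup := by
  intro l
  induction l with
  | nil => intro r0 h; simpa using h
  | cons v l ih => intro r0 h; exact ih _ (PySem.Set.nodup_update r0 (f v) h)

-- length of any pySetD fold
theorem foldl_pySetD_length {α β : Type} (ix : List α → β → Int) (f : List α → β → α) :
    ∀ (l : List β) (acc : List α),
      (l.foldl (fun a x => PySem.List.pySetD a (ix a x) (f a x)) acc).length = acc.length := by
  intro l
  induction l with
  | nil => intro acc; rfl
  | cons x l ih =>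
    intro acc
    rw [List.foldl_cons, ih]
    simp [PySem.List.pySetD, PySem.List.pySet?, PySem.List.pyIdx?]
    split_ifs <;> simp

theorem getD_set_eq {α : Type} (xs : List α) (k m : Nat) (y : α) (d : α) (hk : k < xs.length) :
    (xs.set k y).getD m d = if k = m then y else xs.getD m d := by
  simp only [List.getD_eq_getElem?_getD, List.getElem?_set]
  split_ifs with h
  · subst h; simp
  · rfl

theorem predsRow (n : Nat) (i : Int) (row : List Int) :
    ∀ (acc : List (List Int)), acc.length = n → (∀ v ∈ row, PySem.Raise.InRange n v) →
    ∀ m, m < n → ∀ u,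
      (u ∈ (row.foldl (fun a v => PySem.List.pySetD a v (PySem.List.pyGetD a v [] ++ [i])) acc).getD m []
        ↔ u ∈ acc.getD m [] ∨ (u = i ∧ ∃ v ∈ row, pvWrap n v = m)) := by
  induction row with
  | nil => intro acc _ _ m _ u; simp
  | cons v row ih =>
    intro acc hlen hrow m hm u
    subst hlen
    have hv : PySem.Raise.InRange acc.length v := hrow v (List.mem_cons_self ..)
    rw [List.foldl_cons, pySetD_wrap hv, pyGetD_wrap hv]
    rw [ih _ (by simp) (fun x hx => hrow x (List.mem_cons_of_mem _ hx)) m hm u]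
    rw [getD_set_eq _ _ _ _ _ (pvWrap_lt hv)]
    by_cases he : pvWrap acc.length v = m
    · rw [if_pos he, he]
      simp only [List.mem_append, List.mem_cons, List.not_mem_nil, or_false]
      constructor
      · rintro ((h | rfl) | ⟨rfl, x, hx, hxm⟩)
        · exact Or.inl h
        · exact Or.inr ⟨rfl, v, Or.inl rfl, he⟩
        · exact Or.inr ⟨rfl, x, Or.inr hx, hxm⟩
      · rintro (h | ⟨rfl, x, (rfl | hx), hxm⟩)
        · exact Or.inl (Or.inl h)
        · exact Or.inl (Or.inr rfl)
        · exact Or.inr ⟨rfl, x, hx, hxm⟩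
    · rw [if_neg he]
      simp only [List.mem_cons]
      constructor
      · rintro (h | ⟨rfl, x, hx, hxm⟩)
        · exact Or.inl h
        · exact Or.inr ⟨rfl, x, Or.inr hx, hxm⟩
      · rintro (h | ⟨rfl, x, (rfl | hx), hxm⟩)
        · exact Or.inl h
        · exact absurd hxm he
        · exact Or.inr ⟨rfl, x, hx, hxm⟩

theorem predsMain (n : Nat) (rows : List (Int × List Int)) :
    ∀ (acc : List (List Int)), acc.length = n → (∀ p ∈ rows, ∀ v ∈ p.2, PySem.Raise.InRange n v) →
    ∀ m, m < n → ∀ u,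
      (u ∈ (rows.foldl (fun a p => p.2.foldl (fun a v => PySem.List.pySetD a v (PySem.List.pyGetD a v [] ++ [p.1])) a) acc).getD m []
        ↔ u ∈ acc.getD m [] ∨ ∃ p ∈ rows, u = p.1 ∧ ∃ v ∈ p.2, pvWrap n v = m) := by
  induction rows with
  | nil => intro acc _ _ m _ u; simp
  | cons p rows ih =>
    intro acc hlen hrows m hm u
    rw [List.foldl_cons]
    rw [ih _ (by rw [foldl_pySetD_length (fun a v => v) (fun a v => PySem.List.pyGetD a v [] ++ [p.1])]; exact hlen)
          (fun q hq => hrows q (List.mem_cons_of_mem _ hq)) m hm u]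
    rw [predsRow n p.1 p.2 acc hlen (hrows p (List.mem_cons_self ..)) m hm u]
    simp only [List.mem_cons]
    constructor
    · rintro ((h | h) | ⟨q, hq, h⟩)
      · exact Or.inl h
      · exact Or.inr ⟨p, Or.inl rfl, h⟩
      · exact Or.inr ⟨q, Or.inr hq, h⟩
    · rintro (h | ⟨q, (rfl | hq), h⟩)
      · exact Or.inl (Or.inl h)
      · exact Or.inl (Or.inr h)
      · exact Or.inr ⟨q, hq, h⟩

theorem ringRow (n : Nat) (s : PySem.Set Int) (us : List Int) :
    ∀ (acc : List (PySem.Set Int)), acc.length = n → (∀ u ∈ us, 0 ≤ u ∧ u < (n : Int)) →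
    ∀ j, j < n → ∀ w,
      (w ∈ (us.foldl (fun r u => PySem.List.pySetD r u (PySem.Set.update (PySem.List.pyGetD r u []) s)) acc).getD j []
        ↔ w ∈ acc.getD j [] ∨ ((j : Int) ∈ us ∧ w ∈ s)) := by
  induction us with
  | nil => intro acc _ _ j _ w; simp
  | cons u us ih =>
    intro acc hlen hus j hj w
    subst hlen
    have hu : PySem.Raise.InRange acc.length u := by
      have := hus u (List.mem_cons_self ..); exact ⟨by omega, this.2⟩
    rw [List.foldl_cons, pySetD_wrap hu, pyGetD_wrap hu]
    rw [ih _ (by simp) (fun x hx => hus x (List.mem_cons_of_mem _ hx)) j hj w]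
    rw [getD_set_eq _ _ _ _ _ (pvWrap_lt hu)]
    have h0 : (0:Int) ≤ u := (hus u (List.mem_cons_self ..)).1
    have hwu : pvWrap acc.length u = u.toNat := by
      unfold pvWrap; rw [if_neg (by omega : ¬ u < 0)]
    by_cases he : pvWrap acc.length u = j
    · have hju : (j : Int) = u := by
        have h0 : (0:Int) ≤ u := (hus u (List.mem_cons_self ..)).1
        rw [hwu] at he; omega
      rw [if_pos he, he, PySem.Set.mem_update, List.mem_cons]
      constructor
      · rintro ((h | h) | ⟨h1, h2⟩)
        · exact Or.inl h
        · exact Or.inr ⟨Or.inl hju, h⟩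
        · exact Or.inr ⟨Or.inr h1, h2⟩
      · rintro (h | ⟨(h1 | h1), h2⟩)
        · exact Or.inl (Or.inl h)
        · exact Or.inl (Or.inr h2)
        · exact Or.inr ⟨h1, h2⟩
    · have hju : (j : Int) ≠ u := by
        have h0 : (0:Int) ≤ u := (hus u (List.mem_cons_self ..)).1
        rw [hwu] at he; omega
      rw [if_neg he, List.mem_cons]
      constructor
      · rintro (h | ⟨h1, h2⟩)
        · exact Or.inl h
        · exact Or.inr ⟨Or.inr h1, h2⟩
      · rintro (h | ⟨(h1 | h1), h2⟩)
        · exact Or.inl h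
        · exact absurd h1 hju
        · exact Or.inr ⟨h1, h2⟩

theorem ringRow_nodup (n : Nat) (s : PySem.Set Int) (us : List Int) :
    ∀ (acc : List (PySem.Set Int)), acc.length = n → (∀ u ∈ us, 0 ≤ u ∧ u < (n : Int)) →
    (∀ j, (acc.getD j []).Nodup) →
    ∀ j, ((us.foldl (fun r u => PySem.List.pySetD r u (PySem.Set.update (PySem.List.pyGetD r u []) s)) acc).getD j []).Nodup := by
  induction us with
  | nil => intro acc _ _ h j; simpa using h j
  | cons u us ih =>
    intro acc hlen hus hnd j
    subst hlen
    have hu : PySem.Raise.InRange acc.length u := by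
      have := hus u (List.mem_cons_self ..); exact ⟨by omega, this.2⟩
    rw [List.foldl_cons, pySetD_wrap hu, pyGetD_wrap hu]
    refine ih _ (by simp) (fun x hx => hus x (List.mem_cons_of_mem _ hx)) ?_ j
    intro j'
    by_cases hj' : j' < acc.length
    · rw [getD_set_eq _ _ _ _ _ (pvWrap_lt hu)]
      split_ifs with he
      · exact PySem.Set.nodup_update _ _ (hnd _)
      · exact hnd j'
    · rw [List.getD_eq_getElem?_getD, List.getElem?_eq_none (by simp; omega)]
      simp

theorem ringMain (n : Nat) (preds : List (List Int)) (S : Int → List Int) (hp : preds.length = n)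
    (hpe : ∀ m', m' < n → ∀ u ∈ preds.getD m' [], 0 ≤ u ∧ u < (n : Int)) (ms : List Int) :
    ∀ (acc : List (PySem.Set Int)), acc.length = n → (∀ m ∈ ms, 0 ≤ m ∧ m < (n : Int)) →
    (∀ j, (acc.getD j []).Nodup) →
    (∀ j, ((ms.foldl (fun ring m => (PySem.List.pyGetD preds m []).foldl (fun r u => PySem.List.pySetD r u (PySem.Set.update (PySem.List.pyGetD r u []) (PySem.Set.ofList (S m)))) ring) acc).getD j []).Nodup)
    ∧ ∀ j, j < n → ∀ w,
      (w ∈ (ms.foldl (fun ring m => (PySem.List.pyGetD preds m []).foldl (fun r u => PySem.List.pySetD r u (PySem.Set.update (PySem.List.pyGetD r u []) (PySem.Set.ofList (S m)))) ring) acc).getD j []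
        ↔ w ∈ acc.getD j [] ∨ ∃ m ∈ ms, (j : Int) ∈ preds.getD m.toNat [] ∧ w ∈ PySem.Set.ofList (S m)) := by
  induction ms with
  | nil => intro acc _ _ hnd; exact ⟨hnd, by intro j _ w; simp⟩
  | cons m ms ih =>
    intro acc hlen hms hnd
    have hm := hms m (List.mem_cons_self ..)
    have hmr : PySem.Raise.InRange preds.length m := by rw [hp]; exact ⟨by omega, hm.2⟩
    have hwm : pvWrap preds.length m = m.toNat := by
      unfold pvWrap; rw [if_neg (by omega : ¬ m < 0)]
    have hus : ∀ u ∈ (PySem.List.pyGetD preds m []), 0 ≤ u ∧ u < (n : Int) := by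
      intro u hu
      rw [pyGetD_wrap hmr, hwm] at hu
      exact hpe m.toNat (by omega) u hu
    have hlen' : ((PySem.List.pyGetD preds m []).foldl (fun r u => PySem.List.pySetD r u (PySem.Set.update (PySem.List.pyGetD r u []) (PySem.Set.ofList (S m)))) acc).length = n := by
      rw [foldl_pySetD_length (fun a u => u) (fun a u => PySem.Set.update (PySem.List.pyGetD a u []) (PySem.Set.ofList (S m))), hlen]
    have hnd' := ringRow_nodup n (PySem.Set.ofList (S m)) (PySem.List.pyGetD preds m []) acc hlen hus hnd
    obtain ⟨ihn, ihm⟩ := ih _ hlen' (fun x hx => hms x (List.mem_cons_of_mem _ hx)) hnd'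
    refine ⟨by intro j; rw [List.foldl_cons]; exact ihn j, ?_⟩
    intro j hj w
    rw [List.foldl_cons, ihm j hj w, ringRow n (PySem.Set.ofList (S m)) (PySem.List.pyGetD preds m []) acc hlen hus j hj w]
    rw [pyGetD_wrap hmr, hwm]
    simp only [List.mem_cons]
    constructor
    · rintro ((h | h) | ⟨x, hx, h⟩)
      · exact Or.inl h
      · exact Or.inr ⟨m, Or.inl rfl, h.1, h.2⟩
      · exact Or.inr ⟨x, Or.inr hx, h⟩
    · rintro (h | ⟨x, (rfl | hx), h⟩)
      · exact Or.inl (Or.inl h)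
      · exact Or.inl (Or.inr h)
      · exact Or.inr ⟨x, hx, h⟩

theorem take_set_self {α : Type} (l : List α) (n : Nat) (a : α) : (l.set n a).take n = l.take n := by
  rw [List.take_set, List.set_eq_of_length_le (by rw [List.length_take]; exact min_le_left _ _)]

theorem foldl_enum_pySetD {α β : Type} (g : Int → α → β) :
    ∀ (xs : List α) (s : Nat) (acc : List β), acc.length = s + xs.length →
      (PySem.List.enumerate xs (s : Int)).foldl (fun a p => PySem.List.pySetD a p.1 (g p.1 p.2)) acc
        = acc.take s ++ (PySem.List.enumerate xs (s : Int)).map (fun p => g p.1 p.2) := by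
  intro xs
  induction xs with
  | nil =>
    intro s acc h
    simp [PySem.List.enumerate_nil, List.take_of_length_le (by simp at h; omega : acc.length ≤ s)]
  | cons x xs ih =>
    intro s acc h
    rw [PySem.List.enumerate_cons, List.foldl_cons, List.map_cons]
    have hcast : (s : Int) + 1 = ((s + 1 : Nat) : Int) := by push_cast; ring
    have hset : PySem.List.pySetD acc (s : Int) (g (s : Int) x) = acc.set s (g (s : Int) x) := by
      simp
    rw [hcast, hset, ih (s + 1) _ (by simp at h ⊢; omega)]
    have hs : s < acc.length := by simp at h; omega
    rw [List.take_add_one, take_set_self, List.getElem?_set]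
    simp [hs]

theorem sorted_congr_of_mem {xs ys : List Int} (hx : xs.Nodup) (hy : ys.Nodup)
    (h : ∀ w, w ∈ xs ↔ w ∈ ys) :
    PySem.List.sorted xs (fun x => x) false = PySem.List.sorted ys (fun x => x) false :=
  PySem.List.sorted_eq_sorted_of_perm xs ys (fun x => x) (fun _ _ hab => hab)
    ((List.perm_ext_iff_of_nodup hx hy).mpr h)

theorem getD_replicate_nil {α : Type} (n m : Nat) : (List.replicate n ([] : List α)).getD m [] = [] := by
  rw [List.getD_eq_getElem?_getD, List.getElem?_replicate]
  split_ifs <;> rfl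

theorem getD_replicate_set {α : Type} [BEq α] (n m : Nat) : (List.replicate n (PySem.Set.empty : PySem.Set α)).getD m [] = [] := by
  rw [List.getD_eq_getElem?_getD, List.getElem?_replicate]
  split_ifs <;> rfl

theorem predsMain_len (rows : List (Int × List Int)) :
    ∀ (acc : List (List Int)),
      (rows.foldl (fun a p => p.2.foldl (fun a v => PySem.List.pySetD a v (PySem.List.pyGetD a v [] ++ [p.1])) a) acc).length = acc.length := by
  induction rows with
  | nil => intro acc; rfl
  | cons p rows ih =>
    intro acc
    rw [List.foldl_cons, ih, foldl_pySetD_length (fun a v => v) (fun a v => PySem.List.pyGetD a v [] ++ [p.1])]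

theorem foldl_enum_pySetD_zero {α β : Type} (g : Int → α → β) (xs : List α) (acc : List β) (h : acc.length = xs.length) :
    (PySem.List.enumerate xs 0).foldl (fun a p => PySem.List.pySetD a p.1 (g p.1 p.2)) acc
      = (PySem.List.enumerate xs 0).map (fun p => g p.1 p.2) := by
  have := foldl_enum_pySetD g xs 0 acc (by omega)
  simpa using this

def pvGather (nb : List (List Int)) (i : Int) (row : List Int) : List Int :=
  PySem.List.sorted (PySem.Set.diff (PySem.Set.discard (row.foldl (fun r v => PySem.Set.update r (PySem.List.pyGetD nb v [])) PySem.Set.empty) i) (PySem.Set.ofList row)) (fun x => x) false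

def pvPreds (nb : List (List Int)) : List (List Int) :=
  (PySem.List.enumerate nb 0).foldl (fun a p => p.2.foldl (fun a v => PySem.List.pySetD a v (PySem.List.pyGetD a v [] ++ [p.1])) a) (List.replicate nb.length [])

def pvRing (nb : List (List Int)) : List (PySem.Set Int) :=
  (PySem.List.pyRange 0 (nb.length : Int) 1).foldl (fun ring m => (PySem.List.pyGetD (pvPreds nb) m []).foldl (fun r u => PySem.List.pySetD r u (PySem.Set.update (PySem.List.pyGetD r u []) (PySem.Set.ofList (PySem.List.pyGetD nb m [])))) ring) (List.replicate nb.length PySem.Set.empty)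

def pvScatter (nb : List (List Int)) (i : Int) (row : List Int) : List Int :=
  PySem.List.sorted (PySem.Set.diff (PySem.Set.discard (PySem.List.pyGetD (pvRing nb) i []) i) (PySem.Set.ofList row)) (fun x => x) false

theorem A_eq (nb : List (List Int)) :
    build_reuse_second_ring_neighbors_py nb = (PySem.List.enumerate nb 0).map (fun p => pvGather nb p.1 p.2) :=
  foldl_enum_pySetD_zero (fun i row => pvGather nb i row) nb (List.replicate nb.length []) (by simp)

theorem B_eq (nb : List (List Int)) :
    build_reuse_second_ring_neighbors_py_alt nb = (PySem.List.enumerate nb 0).map (fun p => pvScatter nb p.1 p.2) := by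
  exact (PySem.List.foldl_append_singleton_eq_map (fun p : Int × List Int => pvScatter nb p.1 p.2) (PySem.List.enumerate nb 0) []).trans (List.nil_append _)

theorem pvPreds_len (nb : List (List Int)) : (pvPreds nb).length = nb.length := by
  unfold pvPreds
  rw [predsMain_len, List.length_replicate]

theorem pvPreds_mem (nb : List (List Int))
    (hpre : ∀ row ∈ nb, ∀ v ∈ row, PySem.Raise.InRange nb.length v)
    (m' : Nat) (hm : m' < nb.length) (u : Int) :
    u ∈ (pvPreds nb).getD m' [] ↔
      ∃ (k : Nat) (hk : k < nb.length), u = (k : Int) ∧ ∃ v ∈ nb[k], pvWrap nb.length v = m' := by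
  unfold pvPreds
  rw [predsMain nb.length (PySem.List.enumerate nb 0) (List.replicate nb.length []) (by simp)
        (by
          intro p hp v hv
          obtain ⟨k, hk, rfl⟩ := (PySem.List.mem_enumerate_iff nb 0 p).mp hp
          exact hpre nb[k] (List.getElem_mem hk) v hv)
        m' hm u]
  rw [getD_replicate_nil]
  simp only [List.not_mem_nil, false_or]
  constructor
  · rintro ⟨p, hp, rfl, v, hv, hvm⟩
    obtain ⟨k, hk, rfl⟩ := (PySem.List.mem_enumerate_iff nb 0 p).mp hp
    exact ⟨k, hk, by simp, v, by simpa using hv, hvm⟩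
  · rintro ⟨k, hk, rfl, v, hv, hvm⟩
    refine ⟨((0 : Int) + k, nb[k]), (PySem.List.mem_enumerate_iff nb 0 _).mpr ⟨k, hk, rfl⟩, by simp, v, hv, hvm⟩

theorem pvRing_facts (nb : List (List Int))
    (hpre : ∀ row ∈ nb, ∀ v ∈ row, PySem.Raise.InRange nb.length v) :
    (∀ j, ((pvRing nb).getD j []).Nodup) ∧
    ∀ (j : Nat) (hj : j < nb.length), ∀ w,
      (w ∈ (pvRing nb).getD j [] ↔ ∃ v ∈ nb[j], w ∈ PySem.List.pyGetD nb v []) := by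
  have hpe : ∀ m', m' < nb.length → ∀ u ∈ (pvPreds nb).getD m' [], 0 ≤ u ∧ u < (nb.length : Int) := by
    intro m' hm u hu
    obtain ⟨k, hk, rfl, -⟩ := (pvPreds_mem nb hpre m' hm u).mp hu
    exact ⟨by omega, by exact_mod_cast hk⟩
  obtain ⟨hnd, hmem⟩ := ringMain nb.length (pvPreds nb) (fun m => PySem.List.pyGetD nb m []) (pvPreds_len nb) hpe
    (PySem.List.pyRange 0 (nb.length : Int) 1) (List.replicate nb.length PySem.Set.empty) (by simp)
    (by intro m hm; have := PySem.List.mem_pyRange_one.mp hm; exact ⟨this.1, this.2⟩)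
    (by intro j; rw [getD_replicate_set]; exact List.nodup_nil)
  refine ⟨hnd, ?_⟩
  intro j hj w
  unfold pvRing
  rw [hmem j hj w, getD_replicate_set]
  simp only [List.not_mem_nil, false_or]
  have hjr : PySem.Raise.InRange nb.length (j : Int) := ⟨by omega, by exact_mod_cast hj⟩
  constructor
  · rintro ⟨m, hm, hjp, hw⟩
    have hmr := PySem.List.mem_pyRange_one.mp hm
    have hmn : m.toNat < nb.length := by omega
    obtain ⟨k, hk, hkj, v, hv, hvm⟩ := (pvPreds_mem nb hpre m.toNat hmn (j : Int)).mp hjp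
    have hkj' : j = k := by exact_mod_cast hkj
    subst hkj'
    refine ⟨v, hv, ?_⟩
    have hvr : PySem.Raise.InRange nb.length v := hpre nb[j] (List.getElem_mem hk) v hv
    rw [pyGetD_wrap hvr, hvm]
    have hmw : pvWrap nb.length m = m.toNat := by unfold pvWrap; rw [if_neg (by omega)]
    rw [pyGetD_wrap (⟨by omega, hmr.2⟩ : PySem.Raise.InRange nb.length m), hmw] at hw
    rwa [PySem.Set.mem_ofList] at hw
  · rintro ⟨v, hv, hw⟩
    have hvr : PySem.Raise.InRange nb.length v := hpre nb[j] (List.getElem_mem hj) v hv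
    have hwlt := pvWrap_lt hvr
    refine ⟨(pvWrap nb.length v : Int), PySem.List.mem_pyRange_one.mpr ⟨by omega, by exact_mod_cast hwlt⟩, ?_, ?_⟩
    · rw [Int.toNat_natCast]
      exact (pvPreds_mem nb hpre (pvWrap nb.length v) hwlt (j : Int)).mpr ⟨j, hj, rfl, v, hv, rfl⟩
    · have hmw : pvWrap nb.length ((pvWrap nb.length v : Nat) : Int) = pvWrap nb.length v := by
        unfold pvWrap; rw [if_neg (by omega)]; exact Int.toNat_natCast _
      rw [pyGetD_wrap (⟨by omega, by exact_mod_cast hwlt⟩ : PySem.Raise.InRange nb.length ((pvWrap nb.length v : Nat) : Int)), hmw]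
      rw [PySem.Set.mem_ofList]
      rwa [pyGetD_wrap hvr] at hw

theorem row_eq (nb : List (List Int))
    (hpre : ∀ row ∈ nb, ∀ v ∈ row, PySem.Raise.InRange nb.length v)
    (k : Nat) (hk : k < nb.length) :
    pvGather nb (k : Int) nb[k] = pvScatter nb (k : Int) nb[k] := by
  obtain ⟨hnd, hmem⟩ := pvRing_facts nb hpre
  unfold pvGather pvScatter
  have hget : PySem.List.pyGetD (pvRing nb) (k : Int) [] = (pvRing nb).getD k [] :=
    PySem.List.pyGetD_natCast _ _ _
  apply sorted_congr_of_mem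
  · exact PySem.Set.nodup_diff _ _ (PySem.Set.nodup_discard _ _ (foldl_update_nodup _ _ _ List.nodup_nil))
  · exact PySem.Set.nodup_diff _ _ (PySem.Set.nodup_discard _ _ (by rw [hget]; exact hnd k))
  · intro w
    rw [PySem.Set.mem_diff, PySem.Set.mem_diff, PySem.Set.mem_discard, PySem.Set.mem_discard, hget,
      hmem k hk w, foldl_update_mem]
    simp

theorem main_eq (nb : List (List Int))
    (hpre : ∀ row ∈ nb, ∀ v ∈ row, PySem.Raise.InRange nb.length v) :
    build_reuse_second_ring_neighbors_py nb = build_reuse_second_ring_neighbors_py_alt nb := by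
  rw [A_eq, B_eq]
  apply List.map_congr_left
  intro p hp
  obtain ⟨k, hk, rfl⟩ := (PySem.List.mem_enumerate_iff nb 0 p).mp hp
  simpa using row_eq nb hpre k hk

-- ===== VERDICT (by name: the statement is the Claim_ definition above) =====
theorem build_reuse_second_ring_neighbors_py_spec : Claim_equal_build_reuse_second_ring_neighbors_py := by
  intro neighbors _ hpre
  unfold Spec_build_reuse_second_ring_neighbors_py
  exact main_eq neighbors hpre
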